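-- pv_equiv track=rewrite | github.com/ic-writeups/ic-ctf-writeups | 2023-lautarotorchia/cybergames/reversing/sanityChecker-sleepyPython/1.py | deobfuscate2
-- ===== SOURCE A (Python) =====
-- def deobfuscate2(string):
--     def reverse_alpha(c):
--         if 'a' <= c <= 'z':
--             return chr(ord('z') - (ord(c) - ord('a')))
--         elif 'A' <= c <= 'Z':
--             return chr(ord('Z') - (ord(c) - ord('A')))
--         return c
--     digit_map = {str(i): str(9 - i) for i in range(10)}
--     symbol_map = {'_': '=', '=': '_', '-': '+', '+': '-'}
--     result = []
--     for c in string: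
--         if c.isalpha():
--             result.append(reverse_alpha(c))
--         elif c in digit_map:
--             result.append(digit_map[c])
--         elif c in symbol_map:
--             result.append(symbol_map[c])
--         else:
--             result.append(c)
--     return ''.join(result)
-- ===== SOURCE B (Python) =====
-- def deobfuscate2(string):
--     table = {}
--     for i in range(26):
--         table[ord('a') + i] = ord('z') - i
--         table[ord('A') + i] = ord('Z') - i
--     for i in range(10):
--         table[ord('0') + i] = ord('9') - i
--     for a, b in (('_', '='), ('=', '_'), ('-', '+'), ('+', '-')):
--         table[ord(a)] = ord(b)
--     return string.translate(table)
-- ===== Notes on version B (the rewrite author's own statement) =====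
-- stated objective: faster
-- what changed: Builds the complete ASCII translation table (reverse-alpha, 9-complement digits, four symbol swaps) once and applies str.translate in one C-level pass, removing the per-character if/elif chain and helper function.
import Mathlib
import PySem

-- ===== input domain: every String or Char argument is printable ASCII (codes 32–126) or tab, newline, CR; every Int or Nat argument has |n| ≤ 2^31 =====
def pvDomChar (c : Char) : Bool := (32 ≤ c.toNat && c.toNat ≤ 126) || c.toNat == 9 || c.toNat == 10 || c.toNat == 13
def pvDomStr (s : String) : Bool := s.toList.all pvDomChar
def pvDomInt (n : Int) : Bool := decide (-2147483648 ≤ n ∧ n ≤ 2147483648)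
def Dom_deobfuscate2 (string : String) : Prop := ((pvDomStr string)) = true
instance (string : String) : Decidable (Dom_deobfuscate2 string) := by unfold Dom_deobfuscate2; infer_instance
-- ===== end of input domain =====

-- B builds the full translation table once and applies it via a single map (str.translate); same O(n) cost, no per-char branch chain.


-- ===== PORT A =====
def pvRevAlpha (c : Char) : Char :=
  if 'a' ≤ c ∧ c ≤ 'z' then Char.ofNat ('z'.toNat - (c.toNat - 'a'.toNat))
  else if 'A' ≤ c ∧ c ≤ 'Z' then Char.ofNat ('Z'.toNat - (c.toNat - 'A'.toNat))
  else c

-- {str(i): str(9-i) for i in range(10)}, single-char keys ported as Char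
def pvDigitMap : PySem.Dict Char Char :=
  (PySem.List.pyRange 0 10 1).foldl
    (fun d i => d.insert (Char.ofNat (48 + i.toNat)) (Char.ofNat (48 + (9 - i).toNat)))
    PySem.Dict.empty

def pvSymbolMap : PySem.Dict Char Char :=
  PySem.Dict.ofList [('_', '='), ('=', '_'), ('-', '+'), ('+', '-')]

def deobfuscate2 (string : String) : String :=
  let result : List Char := string.toList.foldl (fun r c =>
    if PySem.Chars.isalpha c then r ++ [pvRevAlpha c]
    else if pvDigitMap.contains c then r ++ [(pvDigitMap.get? c).getD c]
    else if pvSymbolMap.contains c then r ++ [(pvSymbolMap.get? c).getD c]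
    else r ++ [c]) []
  String.mk result

-- ===== PORT B =====
def pvTable : PySem.Dict Int Int :=
  let t := (PySem.List.pyRange 0 26 1).foldl
    (fun d i => (d.insert (97 + i) (122 - i)).insert (65 + i) (90 - i)) PySem.Dict.empty
  let t := (PySem.List.pyRange 0 10 1).foldl (fun d i => d.insert (48 + i) (57 - i)) t
  [('_', '='), ('=', '_'), ('-', '+'), ('+', '-')].foldl
    (fun d (p : Char × Char) => d.insert (p.1.toNat : Int) (p.2.toNat : Int)) t

-- str.translate: each char looked up by its ord in the table, absent chars pass through
def deobfuscate2_alt (string : String) : String :=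
  String.mk (string.toList.map (fun c =>
    match pvTable.get? (c.toNat : Int) with
    | some v => Char.ofNat v.toNat
    | none => c))

-- ===== PRECONDITION & SPEC =====
def Spec_deobfuscate2 (string : String) (out : String) : Prop := out = deobfuscate2_alt string
instance (string : String) (out : String) : Decidable (Spec_deobfuscate2 string out) := by unfold Spec_deobfuscate2; infer_instance

-- ===== CLAIM (what is proved, stated in full; the proofs are below) =====
def Claim_equal_deobfuscate2 : Prop := ∀ (string : String), Dom_deobfuscate2 string → Spec_deobfuscate2 string (deobfuscate2 string)

-- ===== LEMMAS AND PROOFS =====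

def pvStepA (c : Char) : Char :=
  if PySem.Chars.isalpha c then pvRevAlpha c
  else if pvDigitMap.contains c then (pvDigitMap.get? c).getD c
  else if pvSymbolMap.contains c then (pvSymbolMap.get? c).getD c
  else c

def pvStepB (c : Char) : Char :=
  match pvTable.get? (c.toNat : Int) with
  | some v => Char.ofNat v.toNat
  | none => c

theorem pv_foldl_map (l : List Char) (acc : List Char) :
    l.foldl (fun r c =>
      if PySem.Chars.isalpha c then r ++ [pvRevAlpha c]
      else if pvDigitMap.contains c then r ++ [(pvDigitMap.get? c).getD c]
      else if pvSymbolMap.contains c then r ++ [(pvSymbolMap.get? c).getD c]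
      else r ++ [c]) acc = acc ++ l.map pvStepA := by
  induction l generalizing acc with
  | nil => simp
  | cons h t ih =>
    simp only [List.foldl, List.map, pvStepA]
    split_ifs <;> simp [ih]

set_option maxRecDepth 4000 in
theorem pv_step_eq_small : ∀ n : Fin 127, pvStepA (Char.ofNat n) = pvStepB (Char.ofNat n) := by
  decide

theorem pv_step_eq (c : Char) (h : pvDomChar c = true) : pvStepA c = pvStepB c := by
  have hlt : c.toNat < 127 := by
    simp only [pvDomChar, Bool.or_eq_true, Bool.and_eq_true, decide_eq_true_eq,
      beq_iff_eq] at h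
    cases h with
    | inr h => omega
    | inl h => cases h with
      | inr h => omega
      | inl h => cases h with
        | inr h => omega
        | inl h => omega
  have := pv_step_eq_small ⟨c.toNat, hlt⟩
  simpa [Char.ofNat_toNat] using this

-- ===== VERDICT (by name: the statement is the Claim_ definition above) =====
set_option maxRecDepth 100000 in
theorem deobfuscate2_spec : Claim_equal_deobfuscate2 := by
  intro s hdom
  simp only [Spec_deobfuscate2, deobfuscate2, deobfuscate2_alt]
  rw [pv_foldl_map]
  simp only [List.nil_append]
  congr 1
  apply List.map_congr_left
  intro c hc
  have : pvDomChar c = true := by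
    have := hdom
    unfold Dom_deobfuscate2 pvDomStr at this
    exact (List.all_eq_true.mp this) c hc
  show pvStepA c = pvStepB c
  exact pv_step_eq c this
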